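-- pv_equiv track=rewrite | github.com/Robotmurlock/vehicle-autopilot-using-fuzzy-logic-controllers-and-metaheuristics | fuzzy/fuzzy_generator.py | get_ys
-- ===== SOURCE A (Python) =====
-- def get_ys(size):
--     ys = [1, 0]
--     for i in range(2, size):
--         if (i-2)%4 == 0 or (i-2)%4 == 3:
--             ys.append(0)
--         else:
--             ys.append(1)
--     return ys
-- ===== SOURCE B (Python) =====
-- def get_ys(size):
--     # Tile the 4-periodic tail pattern and slice, instead of per-index modulo loop.
--     ys = [1, 0]
--     rem = size - 2
--     ys.extend(([0, 1, 1, 0] * (rem // 4 + 1))[:max(rem, 0)])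
--     return ys
-- ===== Notes on version B (the rewrite author's own statement) =====
-- stated objective: simpler
-- what changed: Replaces the per-index loop with modulo tests by tiling the periodic tail pattern [0, 1, 1, 0] with list multiplication and slicing it to the needed length.
import Mathlib
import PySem

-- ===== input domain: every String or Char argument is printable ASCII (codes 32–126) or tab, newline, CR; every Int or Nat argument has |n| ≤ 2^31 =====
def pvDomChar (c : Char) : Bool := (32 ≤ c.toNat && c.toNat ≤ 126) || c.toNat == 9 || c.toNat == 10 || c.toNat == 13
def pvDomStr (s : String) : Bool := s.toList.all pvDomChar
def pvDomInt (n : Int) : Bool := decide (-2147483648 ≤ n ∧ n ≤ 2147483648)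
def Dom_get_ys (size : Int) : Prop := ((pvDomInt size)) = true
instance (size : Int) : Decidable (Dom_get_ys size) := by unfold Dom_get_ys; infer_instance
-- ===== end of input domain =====

-- B tiles the 4-periodic tail pattern and slices it, instead of A's per-index modulo loop.

-- ===== PORT A =====
def get_ys (size : Int) : List Int :=
  (PySem.List.pyRange 2 size 1).foldl
    (fun ys i =>
      if PySem.Int.mod (i - 2) 4 = 0 ∨ PySem.Int.mod (i - 2) 4 = 3 then ys ++ [0]
      else ys ++ [1])
    [1, 0]

-- ===== PORT B =====
def get_ys_alt (size : Int) : List Int :=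
  let rem := size - 2
  [1, 0] ++
    List.take (max rem 0).toNat
      (List.flatten (List.replicate (PySem.Int.floordiv rem 4 + 1).toNat [0, 1, 1, 0]))

-- ===== PRECONDITION & SPEC =====
def Spec_get_ys (size : Int) (out : List Int) : Prop := out = get_ys_alt size
instance (size : Int) (out : List Int) : Decidable (Spec_get_ys size out) := by unfold Spec_get_ys; infer_instance

-- ===== CLAIM (what is proved, stated in full; the proofs are below) =====
def Claim_equal_get_ys : Prop := ∀ (size : Int), Dom_get_ys size → Spec_get_ys size (get_ys size)

-- ===== LEMMAS AND PROOFS =====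

-- the common 0/1 pattern value at tail index k
def pvF (k : Nat) : Int := if k % 4 = 0 ∨ k % 4 = 3 then 0 else 1

lemma pvF_add_four (k : Nat) : pvF (4 + k) = pvF k := by
  simp [pvF, Nat.add_mod_left]

-- the tiled-and-truncated pattern is pointwise pvF
lemma pvTile (k : Nat) : ∀ n : Nat, n ≤ 4 * k →
    List.take n (List.flatten (List.replicate k ([0, 1, 1, 0] : List Int)))
      = (List.range n).map pvF := by
  induction k with
  | zero => intro n hn; interval_cases n; simp
  | succ k ih =>
    intro n hn
    by_cases h4 : n < 4
    · rw [List.replicate_succ, List.flatten_cons,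
        List.take_append_of_le_length (by simp; omega)]
      interval_cases n <;> decide
    · obtain ⟨m, rfl⟩ : ∃ m, n = 4 + m := ⟨n - 4, by omega⟩
      rw [List.replicate_succ, List.flatten_cons, List.range_add, List.map_append,
        List.map_map]
      have ht : List.take (4 + m) (([0, 1, 1, 0] : List Int) ++
          (List.replicate k ([0, 1, 1, 0] : List Int)).flatten)
          = [0, 1, 1, 0] ++ List.take m (List.replicate k ([0, 1, 1, 0] : List Int)).flatten := by
        simpa using List.take_length_add_append (l₁ := ([0, 1, 1, 0] : List Int))
          (l₂ := (List.replicate k ([0, 1, 1, 0] : List Int)).flatten) m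
      have h4m : List.map (pvF ∘ fun x => 4 + x) (List.range m)
          = List.map pvF (List.range m) :=
        List.map_congr_left fun i _ => pvF_add_four i
      rw [ht, ih m (by omega), h4m,
        show List.map pvF (List.range 4) = ([0, 1, 1, 0] : List Int) from by decide]

-- A's loop body value equals pvF of the tail index
lemma pvBody (k : Nat) :
    (if PySem.Int.mod (2 + (k : Int) - 2) 4 = 0 ∨ PySem.Int.mod (2 + (k : Int) - 2) 4 = 3
      then (0 : Int) else 1) = pvF k := by
  have h2 : (2 + (k : Int) - 2) = (k : Int) := by ring
  have hm : PySem.Int.mod (k : Int) 4 = ((k % 4 : Nat) : Int) := by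
    exact_mod_cast PySem.Int.mod_natCast k 4
  rw [h2, hm, pvF]
  split_ifs with h1 h3 <;> first | rfl | (exfalso; omega)

theorem get_ys_spec : Claim_equal_get_ys := by
  intro size _
  unfold Spec_get_ys get_ys get_ys_alt
  dsimp only
  have hbody : (fun (ys : List Int) (i : Int) =>
      if PySem.Int.mod (i - 2) 4 = 0 ∨ PySem.Int.mod (i - 2) 4 = 3 then ys ++ [0]
      else ys ++ [1])
    = fun ys i => ys ++ [if PySem.Int.mod (i - 2) 4 = 0 ∨ PySem.Int.mod (i - 2) 4 = 3
      then (0 : Int) else 1] := by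
    funext ys i; split_ifs <;> rfl
  rw [hbody, PySem.List.foldl_append_singleton_eq_map, PySem.List.pyRange_one,
    List.map_map]
  by_cases hle : size ≤ 2
  · have h0 : (size - 2).toNat = 0 := by omega
    have hmax : (max (size - 2) 0).toNat = 0 := by omega
    simp [h0, hmax]
  · set n := (size - 2).toNat with hn
    have hrem : size - 2 = (n : Int) := by omega
    have hmax : (max (size - 2) 0).toNat = n := by omega
    have hfd : PySem.Int.floordiv (size - 2) 4 = ((n / 4 : Nat) : Int) := by
      rw [hrem]; exact_mod_cast PySem.Int.floordiv_natCast n 4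
    have htn : (PySem.Int.floordiv (size - 2) 4 + 1).toNat = n / 4 + 1 := by
      rw [hfd]; omega
    rw [hmax, htn, pvTile (n / 4 + 1) n (by omega)]
    congr 1
    exact List.map_congr_left fun i _ => pvBody i
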